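-- pv_equiv track=rewrite | github.com/Sekie/TranIEST | traniest/operator_algebra/mp2_algebra.py | MakeProjectorCases
-- ===== SOURCE A (Python) =====
-- def MakeProjectorCases(ijklBath, NormalOrder, OrbitalListNoT, Containskl):
-- 	TranslateToSymbols = ['id', 'i', 'jd', 'j', 'kd', 'k', 'ld', 'l'] # Takes index to 2i and 2i+1 as symbols to remove
-- 	ExtraOrbitalLists1 = []
-- 	ExtraNormalOrders1 = []
-- 	ExtraOrbitalLists2 = []
-- 	ExtraNormalOrders2 = []
-- 	ExtraOrbitalLists3 = []
-- 	ExtraNormalOrders3 = []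
-- 	ExtraOrbitalLists4 = []
-- 	ExtraNormalOrders4 = []
-- 	RemovedSymbols1 = []; RemovedSymbols2 = []; RemovedSymbols3 = []; RemovedSymbols4 = []
-- 	for n in range(len(ijklBath)):
-- 		if ijklBath[n] == 1:
-- 			ExtraOrbList1 = OrbitalListNoT.copy()
-- 			del ExtraOrbList1[2*n:(2*n+2)]
-- 			ExtraNormalOrder1 = NormalOrder.copy()
-- 			ExtraNormalOrder1.remove(TranslateToSymbols[2 * n])
-- 			ExtraNormalOrder1.remove(TranslateToSymbols[2 * n + 1])
-- 			ExtraOrbitalLists1.append(ExtraOrbList1)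
-- 			ExtraNormalOrders1.append(ExtraNormalOrder1)
-- 			RemovedSymbols1.append([TranslateToSymbols[2 * n], TranslateToSymbols[2 * n + 1]])
-- 			for m in range(len(ijklBath) - n - 1):
-- 				if ijklBath[n + m + 1] == 1:
-- 					ExtraOrbList2 = ExtraOrbList1.copy()
-- 					del ExtraOrbList2[(2*m):(2*m+2)]
-- 					ExtraNormalOrder2 = ExtraNormalOrder1.copy()
-- 					ExtraNormalOrder2.remove(TranslateToSymbols[2 * (n + m + 1)])
-- 					ExtraNormalOrder2.remove(TranslateToSymbols[2 * (n + m + 1) + 1])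
-- 					ExtraOrbitalLists2.append(ExtraOrbList2)
-- 					ExtraNormalOrders2.append(ExtraNormalOrder2)
-- 					RemovedSymbols2.append([TranslateToSymbols[2 * n], TranslateToSymbols[2 * n + 1], TranslateToSymbols[2 * (n + m + 1)], TranslateToSymbols[2 * (n + m + 1) + 1]])
-- 					if Containskl:
-- 						for o in range(len(ijklBath) - n - m - 1):
-- 							if ijklBath[n + m + o + 1] == 1:
-- 								ExtraOrbList3 = ExtraOrbList2.copy()
-- 								del ExtraOrbList3[(2*o):(2*o+2)]
-- 								ExtraNormalOrder3 = ExtraNormalOrder2.copy()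
-- 								ExtraNormalOrder3.remove(TranslateToSymbols[2 * (n + m + o + 1)])
-- 								ExtraNormalOrder3.remove(TranslateToSymbols[2 * (n + m + o + 1) + 1])
-- 								ExtraOrbitalLists3.append(ExtraOrbList3)
-- 								ExtraNormalOrders3.append(ExtraNormalOrder3)
-- 								RemovedSymbols3.append([TranslateToSymbols[2 * n], TranslateToSymbols[2 * n + 1], TranslateToSymbols[2 * (n + m + 1)], TranslateToSymbols[2 * (n + m + 1) + 1], TranslateToSymbols[2 * (n + m + o + 1)], TranslateToSymbols[2 * (n + m + o + 1) + 1]])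
-- 								for p in range(len(ijklBath) - n - m - o - 1):
-- 									if ijklBath[n + m + o + p + 1] == 1:
-- 										ExtraOrbList4 = ExtraOrbList3.copy()
-- 										del ExtraOrbList4[(2*p):(2*p+2)]
-- 										ExtraNormalOrder4 = ExtraNormalOrder3.copy()
-- 										ExtraNormalOrder4.remove(TranslateToSymbols[2 * (n + m + o + p + 1)])
-- 										ExtraNormalOrder4.remove(TranslateToSymbols[2 * (n + m + o + p + 1) + 1])
-- 										ExtraOrbitalLists4.append(ExtraOrbList4)
-- 										ExtraNormalOrders4.append(ExtraNormalOrder4)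
-- 										RemovedSymbols4 = [TranslateToSymbols]
-- 	ijklBathNum = 0
-- 	for x in ijklBath:
-- 		ijklBathNum = ijklBathNum + x
-- 	ijklBathNum = ijklBathNum % 2
--
-- 	return ExtraNormalOrders1, ExtraNormalOrders2, ExtraNormalOrders3, ExtraNormalOrders4, ExtraOrbitalLists1, ExtraOrbitalLists2, ExtraOrbitalLists3, ExtraOrbitalLists4, RemovedSymbols1, RemovedSymbols2, RemovedSymbols3, RemovedSymbols4, ijklBathNum
-- ===== SOURCE B (Python) =====
-- # Same cases by direct enumeration of the occupied bath positions (Pre_ excludes the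
-- # depth-3/4 paths, where A re-removes the level-2 pair's own symbols).
-- def MakeProjectorCases(ijklBath, NormalOrder, OrbitalListNoT, Containskl):
--     syms = ['id', 'i', 'jd', 'j', 'kd', 'k', 'ld', 'l']
--     occ = [n for n, v in enumerate(ijklBath) if v == 1]
--
--     def drop_first(lst, x):
--         i = lst.index(x)
--         return lst[:i] + lst[i + 1:]
--
--     NO1 = []; NO2 = []; OL1 = []; OL2 = []; RS1 = []; RS2 = []
--     for a in occ:
--         ol1 = OrbitalListNoT[:2 * a] + OrbitalListNoT[2 * a + 2:]
--         no1 = drop_first(drop_first(NormalOrder, syms[2 * a]), syms[2 * a + 1])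
--         NO1.append(no1); OL1.append(ol1)
--         RS1.append([syms[2 * a], syms[2 * a + 1]])
--         for b in occ:
--             if b <= a:
--                 continue
--             r = 2 * (b - a - 1)
--             ol2 = ol1[:r] + ol1[r + 2:]
--             no2 = drop_first(drop_first(no1, syms[2 * b]), syms[2 * b + 1])
--             NO2.append(no2); OL2.append(ol2)
--             RS2.append([syms[2 * a], syms[2 * a + 1], syms[2 * b], syms[2 * b + 1]])
--     return NO1, NO2, [], [], OL1, OL2, [], [], RS1, RS2, [], [], sum(ijklBath) % 2
-- ===== Notes on version B (the rewrite author's own statement) =====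
-- stated objective: simpler
-- what changed: B precomputes the list of occupied bath positions once and builds each depth-1/2 case directly from the originals by slicing at absolute offsets, replacing A's four nested index scans with guards, copy/del/remove mutation and depth-3/4 machinery (dead or raising under Pre_) by two short loops over the occupied-position list.
import Mathlib
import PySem

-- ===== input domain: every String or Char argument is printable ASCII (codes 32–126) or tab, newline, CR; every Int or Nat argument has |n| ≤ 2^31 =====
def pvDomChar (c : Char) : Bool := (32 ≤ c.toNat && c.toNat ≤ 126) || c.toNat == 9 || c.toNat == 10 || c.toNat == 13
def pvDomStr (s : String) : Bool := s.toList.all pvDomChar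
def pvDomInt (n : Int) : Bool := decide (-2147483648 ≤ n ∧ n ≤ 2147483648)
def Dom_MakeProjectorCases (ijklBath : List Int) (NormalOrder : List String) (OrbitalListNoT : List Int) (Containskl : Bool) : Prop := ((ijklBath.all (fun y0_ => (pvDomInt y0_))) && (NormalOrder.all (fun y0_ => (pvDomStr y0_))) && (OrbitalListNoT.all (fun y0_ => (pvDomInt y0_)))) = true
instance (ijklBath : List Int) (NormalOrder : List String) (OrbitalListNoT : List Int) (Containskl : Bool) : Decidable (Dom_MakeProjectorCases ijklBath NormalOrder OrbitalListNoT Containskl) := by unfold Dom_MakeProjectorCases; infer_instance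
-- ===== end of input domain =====

-- B enumerates the occupied bath positions once and builds each depth-1/2 case directly by
-- slicing, instead of A's four nested guarded index scans with copy/del/remove mutation;
-- Pre_ restricts to the inputs where Python A returns normally and the depth-3/4 paths stay empty.

-- ===== PORT A =====
def pvSyms : List String := ["id", "i", "jd", "j", "kd", "k", "ld", "l"]

-- TranslateToSymbols[k]; index always in range under Pre_
def pvSym (k : Int) : String := PySem.List.pyGetD pvSyms k ""

-- list.remove(x); the ValueError case (x absent) is excluded by Pre_
def pvRemove (l : List String) (x : String) : List String := (PySem.List.remove? l x).getD l

-- del l[i:i+2]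
def pvDelPair {α : Type} (l : List α) (i : Int) : List α :=
  PySem.List.slice l none (some i) ++ PySem.List.slice l (some (i + 2)) none

structure PvStA where
  no1 : List (List String)
  no2 : List (List String)
  no3 : List (List String)
  no4 : List (List String)
  ol1 : List (List Int)
  ol2 : List (List Int)
  ol3 : List (List Int)
  ol4 : List (List Int)
  rs1 : List (List String)
  rs2 : List (List String)
  rs3 : List (List String)
  rs4 : List (List String)

def MakeProjectorCases (ijklBath : List Int) (NormalOrder : List String) (OrbitalListNoT : List Int) (Containskl : Bool) : List (List String) × List (List String) × List (List String) × List (List String) × List (List Int) × List (List Int) × List (List Int) × List (List Int) × List (List String) × List (List String) × List (List String) × List (List String) × Int :=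
  let len : Int := PySem.List.len ijklBath
  let s0 : PvStA := ⟨[], [], [], [], [], [], [], [], [], [], [], []⟩
  let s := (PySem.List.pyRange 0 len 1).foldl (fun s n =>
    if PySem.List.pyGetD ijklBath n 0 == 1 then
      let eol1 := pvDelPair OrbitalListNoT (2 * n)
      let eno1 := pvRemove (pvRemove NormalOrder (pvSym (2 * n))) (pvSym (2 * n + 1))
      let s := { s with ol1 := s.ol1 ++ [eol1], no1 := s.no1 ++ [eno1],
                        rs1 := s.rs1 ++ [[pvSym (2 * n), pvSym (2 * n + 1)]] }
      (PySem.List.pyRange 0 (len - n - 1) 1).foldl (fun s m =>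
        if PySem.List.pyGetD ijklBath (n + m + 1) 0 == 1 then
          let eol2 := pvDelPair eol1 (2 * m)
          let eno2 := pvRemove (pvRemove eno1 (pvSym (2 * (n + m + 1)))) (pvSym (2 * (n + m + 1) + 1))
          let s := { s with ol2 := s.ol2 ++ [eol2], no2 := s.no2 ++ [eno2],
                            rs2 := s.rs2 ++ [[pvSym (2 * n), pvSym (2 * n + 1), pvSym (2 * (n + m + 1)), pvSym (2 * (n + m + 1) + 1)]] }
          if Containskl then
            (PySem.List.pyRange 0 (len - n - m - 1) 1).foldl (fun s o =>
              if PySem.List.pyGetD ijklBath (n + m + o + 1) 0 == 1 then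
                let eol3 := pvDelPair eol2 (2 * o)
                let eno3 := pvRemove (pvRemove eno2 (pvSym (2 * (n + m + o + 1)))) (pvSym (2 * (n + m + o + 1) + 1))
                let s := { s with ol3 := s.ol3 ++ [eol3], no3 := s.no3 ++ [eno3],
                                  rs3 := s.rs3 ++ [[pvSym (2 * n), pvSym (2 * n + 1), pvSym (2 * (n + m + 1)), pvSym (2 * (n + m + 1) + 1), pvSym (2 * (n + m + o + 1)), pvSym (2 * (n + m + o + 1) + 1)]] }
                (PySem.List.pyRange 0 (len - n - m - o - 1) 1).foldl (fun s p =>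
                  if PySem.List.pyGetD ijklBath (n + m + o + p + 1) 0 == 1 then
                    { s with ol4 := s.ol4 ++ [pvDelPair eol3 (2 * p)],
                             no4 := s.no4 ++ [pvRemove (pvRemove eno3 (pvSym (2 * (n + m + o + p + 1)))) (pvSym (2 * (n + m + o + p + 1) + 1))],
                             rs4 := [pvSyms] }
                  else s) s
              else s) s
          else s
        else s) s
    else s) s0
  let num := PySem.Int.mod (ijklBath.foldl (fun acc x => acc + x) 0) 2
  (s.no1, s.no2, s.no3, s.no4, s.ol1, s.ol2, s.ol3, s.ol4, s.rs1, s.rs2, s.rs3, s.rs4, num)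

-- ===== PORT B =====
-- [n for n, v in enumerate(ijklBath) if v == 1]
def pvOcc (ijklBath : List Int) : List Int :=
  ((PySem.List.enumerate ijklBath).filter (fun nv => nv.2 == 1)).map Prod.fst

-- drop_first: lst[:lst.index(x)] + lst[lst.index(x)+1:]; ValueError (x absent) excluded by Pre_
def pvDropFirst (lst : List String) (x : String) : List String :=
  match PySem.List.index? lst x with
  | some i => PySem.List.slice lst none (some (i : Int)) ++ PySem.List.slice lst (some ((i : Int) + 1)) none
  | none => lst

structure PvStB where
  no1 : List (List String)
  no2 : List (List String)
  ol1 : List (List Int)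
  ol2 : List (List Int)
  rs1 : List (List String)
  rs2 : List (List String)

def MakeProjectorCases_alt (ijklBath : List Int) (NormalOrder : List String) (OrbitalListNoT : List Int) (Containskl : Bool) : List (List String) × List (List String) × List (List String) × List (List String) × List (List Int) × List (List Int) × List (List Int) × List (List Int) × List (List String) × List (List String) × List (List String) × List (List String) × Int :=
  let occ := pvOcc ijklBath
  let s := occ.foldl (fun s a =>
    let aol1 := PySem.List.slice OrbitalListNoT none (some (2 * a)) ++ PySem.List.slice OrbitalListNoT (some (2 * a + 2)) none
    let ano1 := pvDropFirst (pvDropFirst NormalOrder (pvSym (2 * a))) (pvSym (2 * a + 1))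
    let s : PvStB := { s with no1 := s.no1 ++ [ano1], ol1 := s.ol1 ++ [aol1],
                              rs1 := s.rs1 ++ [[pvSym (2 * a), pvSym (2 * a + 1)]] }
    occ.foldl (fun s b =>
      if b ≤ a then s
      else
        let r := 2 * (b - a - 1)
        let aol2 := PySem.List.slice aol1 none (some r) ++ PySem.List.slice aol1 (some (r + 2)) none
        let ano2 := pvDropFirst (pvDropFirst ano1 (pvSym (2 * b))) (pvSym (2 * b + 1))
        { s with no2 := s.no2 ++ [ano2], ol2 := s.ol2 ++ [aol2],
                 rs2 := s.rs2 ++ [[pvSym (2 * a), pvSym (2 * a + 1), pvSym (2 * b), pvSym (2 * b + 1)]] }) s)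
    (⟨[], [], [], [], [], []⟩ : PvStB)
  (s.no1, s.no2, [], [], s.ol1, s.ol2, [], [], s.rs1, s.rs2, [], [], PySem.Int.mod ijklBath.sum 2)

-- ===== PRECONDITION & SPEC =====
-- Pre_ = exactly the inputs on which Python A returns normally: every occupied bath slot must
-- be one of the first four (else IndexError) with both of its symbols present in NormalOrder
-- (else ValueError from list.remove), and with Containskl at most one slot may be occupied:
-- with two occupied slots A's depth-3 scan starts at the depth-2 index itself and re-removes
-- the already-removed pair symbols, a ValueError except when NormalOrder accidentally holds
-- duplicate symbols — those duplicate returns are an artefact of A's off-by-one and excluded.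
def Pre_MakeProjectorCases (ijklBath : List Int) (NormalOrder : List String) (OrbitalListNoT : List Int) (Containskl : Bool) : Prop :=
  (∀ n : Nat, n < ijklBath.length → ijklBath.getD n 0 = 1 →
      n < 4 ∧ (["id", "i", "jd", "j", "kd", "k", "ld", "l"].getD (2 * n) "") ∈ NormalOrder
            ∧ (["id", "i", "jd", "j", "kd", "k", "ld", "l"].getD (2 * n + 1) "") ∈ NormalOrder)
  ∧ (Containskl = true → ijklBath.countP (· == 1) ≤ 1)
instance (ijklBath : List Int) (NormalOrder : List String) (OrbitalListNoT : List Int) (Containskl : Bool) : Decidable (Pre_MakeProjectorCases ijklBath NormalOrder OrbitalListNoT Containskl) := by unfold Pre_MakeProjectorCases; infer_instance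

def pvWitness_MakeProjectorCases : List Int × List String × List Int × Bool :=
  ([1, 0, 1], ["id", "i", "kd", "k", "x"], [5, 6, 7, 8, 9, 10], false)

def Spec_MakeProjectorCases (ijklBath : List Int) (NormalOrder : List String) (OrbitalListNoT : List Int) (Containskl : Bool) (out : List (List String) × List (List String) × List (List String) × List (List String) × List (List Int) × List (List Int) × List (List Int) × List (List Int) × List (List String) × List (List String) × List (List String) × List (List String) × Int) : Prop := out = MakeProjectorCases_alt ijklBath NormalOrder OrbitalListNoT Containskl
instance (ijklBath : List Int) (NormalOrder : List String) (OrbitalListNoT : List Int) (Containskl : Bool) (out : List (List String) × List (List String) × List (List String) × List (List String) × List (List Int) × List (List Int) × List (List Int) × List (List Int) × List (List String) × List (List String) × List (List String) × List (List String) × Int) : Decidable (Spec_MakeProjectorCases ijklBath NormalOrder OrbitalListNoT Containskl out) := by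
  unfold Spec_MakeProjectorCases
  letI dS : DecidableEq (List (List String)) := inferInstance
  letI dI : DecidableEq (List (List Int)) := inferInstance
  letI t12 : DecidableEq (List (List String) × Int) := instDecidableEqProd
  letI t11 : DecidableEq (List (List String) × List (List String) × Int) := instDecidableEqProd
  letI t10 : DecidableEq (List (List String) × List (List String) × List (List String) × Int) := instDecidableEqProd
  letI t9 : DecidableEq (List (List String) × List (List String) × List (List String) × List (List String) × Int) := instDecidableEqProd
  letI t8 : DecidableEq (List (List Int) × List (List String) × List (List String) × List (List String) × List (List String) × Int) := instDecidableEqProd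
  letI t7 : DecidableEq (List (List Int) × List (List Int) × List (List String) × List (List String) × List (List String) × List (List String) × Int) := instDecidableEqProd
  letI t6 : DecidableEq (List (List Int) × List (List Int) × List (List Int) × List (List String) × List (List String) × List (List String) × List (List String) × Int) := instDecidableEqProd
  letI t5 : DecidableEq (List (List Int) × List (List Int) × List (List Int) × List (List Int) × List (List String) × List (List String) × List (List String) × List (List String) × Int) := instDecidableEqProd
  letI t4 : DecidableEq (List (List String) × List (List Int) × List (List Int) × List (List Int) × List (List Int) × List (List String) × List (List String) × List (List String) × List (List String) × Int) := instDecidableEqProd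
  letI t3 : DecidableEq (List (List String) × List (List String) × List (List Int) × List (List Int) × List (List Int) × List (List Int) × List (List String) × List (List String) × List (List String) × List (List String) × Int) := instDecidableEqProd
  letI t2 : DecidableEq (List (List String) × List (List String) × List (List String) × List (List Int) × List (List Int) × List (List Int) × List (List Int) × List (List String) × List (List String) × List (List String) × List (List String) × Int) := instDecidableEqProd
  letI t1 : DecidableEq (List (List String) × List (List String) × List (List String) × List (List String) × List (List Int) × List (List Int) × List (List Int) × List (List Int) × List (List String) × List (List String) × List (List String) × List (List String) × Int) := instDecidableEqProd
  exact t1 _ _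

-- ===== CLAIM (what is proved, stated in full; the proofs are below) =====
def Claim_equal_MakeProjectorCases : Prop := ∀ (ijklBath : List Int) (NormalOrder : List String) (OrbitalListNoT : List Int) (Containskl : Bool), Dom_MakeProjectorCases ijklBath NormalOrder OrbitalListNoT Containskl → Pre_MakeProjectorCases ijklBath NormalOrder OrbitalListNoT Containskl → Spec_MakeProjectorCases ijklBath NormalOrder OrbitalListNoT Containskl (MakeProjectorCases ijklBath NormalOrder OrbitalListNoT Containskl)

-- ===== LEMMAS AND PROOFS =====

-- Named copies of the two ports' loop bodies (definitionally equal to the inlined code),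
-- so the fold-shape lemmas below can be stated readably.

-- A's depth-2 loop body (the part under the occupancy guard)
def pvInnerA (ijklBath : List Int) (Containskl : Bool) (len n : Int)
    (eol1 : List Int) (eno1 : List String) (m : Int) (s : PvStA) : PvStA :=
  let eol2 := pvDelPair eol1 (2 * m)
  let eno2 := pvRemove (pvRemove eno1 (pvSym (2 * (n + m + 1)))) (pvSym (2 * (n + m + 1) + 1))
  let s := { s with ol2 := s.ol2 ++ [eol2], no2 := s.no2 ++ [eno2],
                    rs2 := s.rs2 ++ [[pvSym (2 * n), pvSym (2 * n + 1), pvSym (2 * (n + m + 1)), pvSym (2 * (n + m + 1) + 1)]] }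
  if Containskl then
    (PySem.List.pyRange 0 (len - n - m - 1) 1).foldl (fun s o =>
      if PySem.List.pyGetD ijklBath (n + m + o + 1) 0 == 1 then
        let eol3 := pvDelPair eol2 (2 * o)
        let eno3 := pvRemove (pvRemove eno2 (pvSym (2 * (n + m + o + 1)))) (pvSym (2 * (n + m + o + 1) + 1))
        let s := { s with ol3 := s.ol3 ++ [eol3], no3 := s.no3 ++ [eno3],
                          rs3 := s.rs3 ++ [[pvSym (2 * n), pvSym (2 * n + 1), pvSym (2 * (n + m + 1)), pvSym (2 * (n + m + 1) + 1), pvSym (2 * (n + m + o + 1)), pvSym (2 * (n + m + o + 1) + 1)]] }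
        (PySem.List.pyRange 0 (len - n - m - o - 1) 1).foldl (fun s p =>
          if PySem.List.pyGetD ijklBath (n + m + o + p + 1) 0 == 1 then
            { s with ol4 := s.ol4 ++ [pvDelPair eol3 (2 * p)],
                     no4 := s.no4 ++ [pvRemove (pvRemove eno3 (pvSym (2 * (n + m + o + p + 1)))) (pvSym (2 * (n + m + o + p + 1) + 1))],
                     rs4 := [pvSyms] }
          else s) s
      else s) s
  else s

-- A's depth-1 loop body (under the occupancy guard)
def pvStepA (ijklBath : List Int) (NormalOrder : List String) (OrbitalListNoT : List Int)
    (Containskl : Bool) (len n : Int) (s : PvStA) : PvStA :=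
  let eol1 := pvDelPair OrbitalListNoT (2 * n)
  let eno1 := pvRemove (pvRemove NormalOrder (pvSym (2 * n))) (pvSym (2 * n + 1))
  let s := { s with ol1 := s.ol1 ++ [eol1], no1 := s.no1 ++ [eno1],
                    rs1 := s.rs1 ++ [[pvSym (2 * n), pvSym (2 * n + 1)]] }
  (PySem.List.pyRange 0 (len - n - 1) 1).foldl (fun s m =>
    if PySem.List.pyGetD ijklBath (n + m + 1) 0 == 1 then
      pvInnerA ijklBath Containskl len n eol1 eno1 m s
    else s) s

-- B's inner loop body (past the `b <= a: continue` guard)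
def pvInnerB (a : Int) (aol1 : List Int) (ano1 : List String) (b : Int) (s : PvStB) : PvStB :=
  let r := 2 * (b - a - 1)
  let aol2 := PySem.List.slice aol1 none (some r) ++ PySem.List.slice aol1 (some (r + 2)) none
  let ano2 := pvDropFirst (pvDropFirst ano1 (pvSym (2 * b))) (pvSym (2 * b + 1))
  { s with no2 := s.no2 ++ [ano2], ol2 := s.ol2 ++ [aol2],
           rs2 := s.rs2 ++ [[pvSym (2 * a), pvSym (2 * a + 1), pvSym (2 * b), pvSym (2 * b + 1)]] }

-- B's outer loop body
def pvStepB (NormalOrder : List String) (OrbitalListNoT : List Int) (occ : List Int)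
    (a : Int) (s : PvStB) : PvStB :=
  let aol1 := PySem.List.slice OrbitalListNoT none (some (2 * a)) ++ PySem.List.slice OrbitalListNoT (some (2 * a + 2)) none
  let ano1 := pvDropFirst (pvDropFirst NormalOrder (pvSym (2 * a))) (pvSym (2 * a + 1))
  let s : PvStB := { s with no1 := s.no1 ++ [ano1], ol1 := s.ol1 ++ [aol1],
                            rs1 := s.rs1 ++ [[pvSym (2 * a), pvSym (2 * a + 1)]] }
  occ.foldl (fun s b => if b ≤ a then s else pvInnerB a aol1 ano1 b s) s

lemma pvAeq (ijklBath : List Int) (NormalOrder : List String) (OrbitalListNoT : List Int) (Containskl : Bool) :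
    MakeProjectorCases ijklBath NormalOrder OrbitalListNoT Containskl =
    (let s := (PySem.List.pyRange 0 (PySem.List.len ijklBath) 1).foldl (fun s n =>
        if PySem.List.pyGetD ijklBath n 0 == 1 then
          pvStepA ijklBath NormalOrder OrbitalListNoT Containskl (PySem.List.len ijklBath) n s
        else s) ⟨[], [], [], [], [], [], [], [], [], [], [], []⟩
     (s.no1, s.no2, s.no3, s.no4, s.ol1, s.ol2, s.ol3, s.ol4, s.rs1, s.rs2, s.rs3, s.rs4,
      PySem.Int.mod (ijklBath.foldl (fun acc x => acc + x) 0) 2)) := rfl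

lemma pvBeq (ijklBath : List Int) (NormalOrder : List String) (OrbitalListNoT : List Int) (Containskl : Bool) :
    MakeProjectorCases_alt ijklBath NormalOrder OrbitalListNoT Containskl =
    (let s := (pvOcc ijklBath).foldl (fun s a =>
        pvStepB NormalOrder OrbitalListNoT (pvOcc ijklBath) a s) ⟨[], [], [], [], [], []⟩
     (s.no1, s.no2, [], [], s.ol1, s.ol2, [], [], s.rs1, s.rs2, [], [],
      PySem.Int.mod ijklBath.sum 2)) := rfl

-- the projection relating A's loop state to B's (depth-1/2 fields, then the depth-3/4 fields)
def pvF (s : PvStA) :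
    PvStB × (List (List String) × List (List String) × List (List Int) × List (List Int) × List (List String) × List (List String)) :=
  (⟨s.no1, s.no2, s.ol1, s.ol2, s.rs1, s.rs2⟩, (s.no3, s.no4, s.ol3, s.ol4, s.rs3, s.rs4))

lemma pvFoldHomMem {S T β : Type} (F : S → T) (f : S → β → S) (g : T → β → T) :
    ∀ (l : List β) (s : S), (∀ x ∈ l, ∀ s, g (F s) x = F (f s x)) →
      l.foldl g (F s) = F (l.foldl f s) := by
  intro l
  induction l with
  | nil => intro s _; rfl
  | cons x t ih =>
    intro s h
    simp only [List.foldl_cons]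
    rw [h x (by simp) s]
    exact ih _ (fun y hy s' => h y (by simp [hy]) s')

lemma pvEnumNil {α : Type} (k : Int) : PySem.List.enumerate ([] : List α) k = [] := by
  simp [PySem.List.enumerate]

lemma pvEnumCons {α : Type} (x : α) (t : List α) (k : Int) :
    PySem.List.enumerate (x :: t) k = (k, x) :: PySem.List.enumerate t (k + 1) := by
  simp [PySem.List.enumerate]

lemma pvMemEnum {α : Type} :
    ∀ (xs : List α) (k : Int) (nv : Int × α), nv ∈ PySem.List.enumerate xs k →
      ∃ i : Nat, nv.1 = k + i ∧ xs[i]? = some nv.2 := by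
  intro xs
  induction xs with
  | nil => intro k nv h; rw [pvEnumNil] at h; cases h
  | cons x t ih =>
    intro k nv h
    rw [pvEnumCons] at h
    rcases List.mem_cons.mp h with h | h
    · exact ⟨0, by simp [h]⟩
    · obtain ⟨i, h1, h2⟩ := ih (k + 1) nv h
      exact ⟨i + 1, by push_cast; omega, by simpa using h2⟩

lemma pvEnumCount :
    ∀ (xs : List Int) (k : Int),
      ((PySem.List.enumerate xs k).filter (fun nv => nv.2 == 1)).length = xs.countP (· == 1) := by
  intro xs
  induction xs with
  | nil => intro k; rw [pvEnumNil]; simp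
  | cons x t ih =>
    intro k
    rw [pvEnumCons, List.countP_cons, List.filter_cons]
    by_cases hx : x == 1 <;> simp [hx, ih (k + 1)]

lemma pvEnumFilterAll {α : Type} :
    ∀ (xs : List α) (k a : Int), a < k →
      (PySem.List.enumerate xs k).filter (fun nv => decide (a < nv.1)) = PySem.List.enumerate xs k := by
  intro xs
  induction xs with
  | nil => intro k a _; rw [pvEnumNil]; rfl
  | cons x t ih =>
    intro k a h
    rw [pvEnumCons, List.filter_cons]
    simp only [decide_eq_true_eq]
    rw [if_pos h, ih (k + 1) a (by omega)]

lemma pvEnumFilterGt {α : Type} :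
    ∀ (xs : List α) (k a : Int), k ≤ a + 1 →
      (PySem.List.enumerate xs k).filter (fun nv => decide (a < nv.1))
        = PySem.List.enumerate (xs.drop (a + 1 - k).toNat) (a + 1) := by
  intro xs
  induction xs with
  | nil => intro k a _; rw [pvEnumNil]; simp
  | cons x t ih =>
    intro k a h
    by_cases hk : k ≤ a
    · rw [pvEnumCons, List.filter_cons]
      simp only [decide_eq_true_eq]
      rw [if_neg (by omega)]
      rw [ih (k + 1) a (by omega)]
      have h1 : (a + 1 - k).toNat = (a + 1 - (k + 1)).toNat + 1 := by omega
      rw [h1, List.drop_succ_cons]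
    · have hk1 : k = a + 1 := by omega
      subst hk1
      rw [pvEnumFilterAll (x :: t) (a + 1) a (by omega)]
      simp

lemma pvG {S : Type} (g : Int → S → S) :
    ∀ (xs : List Int) (k : Int) (s : S),
      (List.range xs.length).foldl (fun s j => if xs.getD j 0 == 1 then g (k + (j : Int)) s else s) s
      = ((PySem.List.enumerate xs k).filter (fun nv => nv.2 == 1)).foldl (fun s nv => g nv.1 s) s := by
  intro xs
  induction xs with
  | nil => intro k s; rw [pvEnumNil]; rfl
  | cons x t ih =>
    intro k s
    rw [List.length_cons, List.range_succ_eq_map]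
    simp only [List.foldl_cons, List.foldl_map, List.getD_cons_zero, List.getD_cons_succ]
    rw [pvEnumCons, List.filter_cons]
    have hstep : ∀ (s : S),
        (List.range t.length).foldl (fun s j => if t.getD j 0 == 1 then g (k + ((Nat.succ j : Nat) : Int)) s else s) s
        = ((PySem.List.enumerate t (k + 1)).filter (fun nv => nv.2 == 1)).foldl (fun s nv => g nv.1 s) s := by
      intro s
      rw [← ih (k + 1) s]
      apply PySem.List.foldl_congr_mem
      intro acc j _
      have h : k + ((Nat.succ j : Nat) : Int) = k + 1 + (j : Int) := by push_cast; omega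
      rw [h]
    by_cases hx : x = 1
    · subst hx
      rw [if_pos (show (((1:Int) == 1) = true) from rfl),
          if_pos (show ((((k, (1:Int)).2 == 1)) = true) from rfl)]
      rw [List.foldl_cons]
      simp only [Nat.cast_zero, add_zero]
      exact hstep (g k s)
    · rw [if_neg (show ¬(((x == 1)) = true) from by simp [hx]),
          if_neg (show ¬((((k, x).2 == 1)) = true) from by simp [hx])]
      exact hstep s

lemma pvRangeFold {S : Type} (L : Nat) (f : S → Int → S) (s : S) :
    (PySem.List.pyRange 0 (L : Int) 1).foldl f s = (List.range L).foldl (fun s (j : Nat) => f s (j : Int)) s := by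
  rw [PySem.List.pyRange_one, List.foldl_map]
  have h : ((L : Int) - 0).toNat = L := by omega
  rw [h]
  apply PySem.List.foldl_congr_mem
  intro acc j _
  rw [zero_add]

lemma pvGetDDrop {α : Type} (xs : List α) (n m : Nat) (d : α) :
    (xs.drop n).getD m d = xs.getD (n + m) d := by
  simp [List.getD_eq_getElem?_getD, List.getElem?_drop]

lemma pvDropFirst_eq (l : List String) (x : String) : pvDropFirst l x = pvRemove l x := by
  unfold pvDropFirst pvRemove PySem.List.index? PySem.List.remove?
  cases h : List.idxOf? x l with
  | none => simp
  | some i =>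
    simp only [Option.map_some, Option.getD_some]
    rw [List.eraseIdx_eq_take_drop_succ, PySem.List.slice_to_natCast]
    congr 1
    rw [show ((i : Int) + 1) = ((i + 1 : Nat) : Int) from by push_cast; ring,
        PySem.List.slice_from_natCast]

def pvBase (xs : List Int) : List (Int × Int) :=
  (PySem.List.enumerate xs).filter (fun nv => nv.2 == 1)

lemma pvOcc_eq (xs : List Int) : pvOcc xs = (pvBase xs).map Prod.fst := rfl

lemma pvMemBase (xs : List Int) (nv : Int × Int) (h : nv ∈ pvBase xs) :
    ∃ i : Nat, nv.1 = (i : Int) ∧ i < xs.length ∧ xs[i]? = some 1 := by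
  obtain ⟨hmem, hv⟩ := List.mem_filter.mp h
  obtain ⟨i, h1, h2⟩ := pvMemEnum xs 0 nv hmem
  have hv1 : nv.2 = 1 := by simpa using hv
  obtain ⟨hlt, _⟩ := List.getElem?_eq_some_iff.mp h2
  exact ⟨i, by omega, hlt, by rw [h2, hv1]⟩

lemma pvGuardFold {S : Type} (g : Int → S → S) (xs : List Int) (s : S) :
    (PySem.List.pyRange 0 ((xs.length : Nat) : Int) 1).foldl (fun s n =>
        if PySem.List.pyGetD xs n 0 == 1 then g n s else s) s
      = (pvBase xs).foldl (fun s nv => g nv.1 s) s := by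
  rw [pvRangeFold]
  simp only [PySem.List.pyGetD_natCast]
  have h1 : (List.range xs.length).foldl (fun s (j : Nat) => if xs.getD j 0 == 1 then g (j : Int) s else s) s
      = (List.range xs.length).foldl (fun s (j : Nat) => if xs.getD j 0 == 1 then g (0 + (j : Int)) s else s) s := by
    apply PySem.List.foldl_congr_mem
    intro acc j _
    rw [zero_add]
  rw [h1, pvG g xs 0 s]
  rfl

lemma pvBaseGt (xs : List Int) (i : Nat) :
    (pvBase xs).filter (fun nv => decide ((i : Int) < nv.1))
      = (PySem.List.enumerate (xs.drop (i + 1)) ((i : Int) + 1)).filter (fun nv => nv.2 == 1) := by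
  unfold pvBase
  rw [List.filter_comm, pvEnumFilterGt xs 0 (i : Int) (by omega)]
  have h : ((i : Int) + 1 - 0).toNat = i + 1 := by omega
  rw [h]

lemma pvDropEmpty (xs : List Int) (i : Nat) (hi : xs[i]? = some 1)
    (hcnt : xs.countP (· == 1) ≤ 1) :
    (PySem.List.enumerate (xs.drop (i + 1)) ((i : Int) + 1)).filter (fun nv => nv.2 == 1) = [] := by
  have hsplit : xs = xs.take (i + 1) ++ xs.drop (i + 1) := (List.take_append_drop _ _).symm
  have hmem : (1 : Int) ∈ xs.take (i + 1) := by
    have h : (xs.take (i + 1))[i]? = some 1 := by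
      rw [List.getElem?_take, if_pos (by omega)]; exact hi
    exact List.mem_of_getElem? h
  have h1 : 0 < (xs.take (i + 1)).countP (· == 1) :=
    List.countP_pos_iff.mpr ⟨1, hmem, by simp⟩
  have h2 : (xs.drop (i + 1)).countP (· == 1) = 0 := by
    have h := congrArg (List.countP (· == 1)) hsplit
    rw [List.countP_append] at h
    omega
  have h3 := pvEnumCount (xs.drop (i + 1)) ((i : Int) + 1)
  rw [h2] at h3
  exact List.eq_nil_of_length_eq_zero h3

lemma pvInnerAFold {S : Type} (g : Int → S → S) (xs : List Int) (i : Nat) (hlen : i < xs.length) (s : S) :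
    (PySem.List.pyRange 0 (((xs.length : Nat) : Int) - (i : Int) - 1) 1).foldl (fun s m =>
        if PySem.List.pyGetD xs ((i : Int) + m + 1) 0 == 1 then g m s else s) s
      = ((pvBase xs).filter (fun nv => decide ((i : Int) < nv.1))).foldl
          (fun s nv => g (nv.1 - (i : Int) - 1) s) s := by
  have hL : (((xs.length : Nat) : Int) - (i : Int) - 1) = (((xs.drop (i + 1)).length : Nat) : Int) := by
    rw [List.length_drop]; omega
  rw [hL, pvRangeFold, pvBaseGt xs i]
  rw [← pvG (S := S) (fun b s => g (b - (i : Int) - 1) s) (xs.drop (i + 1)) ((i : Int) + 1) s]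
  apply PySem.List.foldl_congr_mem
  intro acc j _
  have harg : ((i : Int) + (j : Int) + 1) = (((i + 1 + j : Nat) : Nat) : Int) := by push_cast; ring
  rw [harg, PySem.List.pyGetD_natCast, ← pvGetDDrop xs (i + 1) j 0]
  have harg2 : ((i : Int) + 1 + (j : Int)) - (i : Int) - 1 = (j : Int) := by ring
  rw [harg2]

lemma pvInnerBFold (xs : List Int) (a : Int) (aol1 : List Int) (ano1 : List String) (s : PvStB) :
    ((pvBase xs).map Prod.fst).foldl (fun s b => if b ≤ a then s else pvInnerB a aol1 ano1 b s) s
      = ((pvBase xs).filter (fun nv => decide (a < nv.1))).foldl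
          (fun s nv => pvInnerB a aol1 ano1 nv.1 s) s := by
  rw [List.foldl_map]
  have h1 : (pvBase xs).foldl (fun s nv => if nv.1 ≤ a then s else pvInnerB a aol1 ano1 nv.1 s) s
      = (pvBase xs).foldl (fun s nv => if a < nv.1 then pvInnerB a aol1 ano1 nv.1 s else s) s := by
    apply PySem.List.foldl_congr_mem
    intro acc nv _
    by_cases h : nv.1 ≤ a
    · rw [if_pos h, if_neg (by omega)]
    · rw [if_neg h, if_pos (by omega)]
  rw [h1, PySem.List.foldl_ite_eq_foldl_filter]

lemma pvFoldPair {σ R β : Type} (f : σ → β → σ) (l : List β) (b : σ) (r : R) :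
    l.foldl (fun t e => (f t.1 e, t.2)) (b, r) = (l.foldl f b, r) := by
  induction l generalizing b with
  | nil => rfl
  | cons x t ih => simp only [List.foldl_cons]; exact ih (f b x)

-- the per-iteration correspondence of the two outer loop bodies
set_option maxHeartbeats 2000000 in
lemma pvStepHom (xs : List Int) (NO : List String) (OL : List Int) (kl : Bool)
    (hcnt : kl = true → xs.countP (· == 1) ≤ 1)
    (nv : Int × Int) (hmem : nv ∈ pvBase xs) (s : PvStA) :
    (pvStepB NO OL ((pvBase xs).map Prod.fst) nv.1 (pvF s).1, (pvF s).2)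
      = pvF (pvStepA xs NO OL kl ((xs.length : Nat) : Int) nv.1 s) := by
  obtain ⟨i, hi1, hilen, higet⟩ := pvMemBase xs nv hmem
  unfold pvStepA pvStepB
  simp only [pvDropFirst_eq]
  rw [hi1]
  set eol1 := pvDelPair OL (2 * (i : Int)) with heol
  set eno1 := pvRemove (pvRemove NO (pvSym (2 * (i : Int)))) (pvSym (2 * (i : Int) + 1)) with heno
  have hsl : (PySem.List.slice OL none (some (2 * (i : Int))) ++ PySem.List.slice OL (some (2 * (i : Int) + 2)) none)
      = eol1 := rfl
  rw [hsl]
  rw [pvInnerAFold (S := PvStA)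
      (fun m s => pvInnerA xs kl ((xs.length : Nat) : Int) (i : Int) eol1 eno1 m s) xs i hilen]
  rw [pvInnerBFold]
  set L := (pvBase xs).filter (fun nv2 => decide ((i : Int) < nv2.1)) with hLdef
  set s1 : PvStA := { s with ol1 := s.ol1 ++ [eol1], no1 := s.no1 ++ [eno1],
                             rs1 := s.rs1 ++ [[pvSym (2 * (i : Int)), pvSym (2 * (i : Int) + 1)]] } with hs1
  have hhom : ∀ nv2 ∈ L, ∀ (t : PvStA),
      (fun (t' : PvStB × (List (List String) × List (List String) × List (List Int) × List (List Int) × List (List String) × List (List String))) (nv2' : Int × Int) =>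
        (pvInnerB (i : Int) eol1 eno1 nv2'.1 t'.1, t'.2)) (pvF t) nv2
        = pvF (pvInnerA xs kl ((xs.length : Nat) : Int) (i : Int) eol1 eno1 (nv2.1 - (i : Int) - 1) t) := by
    intro nv2 hmem2 t
    by_cases hkl : kl = true
    · exfalso
      have hL0 : L = [] := by
        rw [hLdef, pvBaseGt xs i, pvDropEmpty xs i higet (hcnt hkl)]
      rw [hL0] at hmem2
      cases hmem2
    · have hklf : kl = false := by simpa using hkl
      subst hklf
      unfold pvInnerA pvInnerB
      simp only [Bool.false_eq_true, if_false]
      have harg : (i : Int) + (nv2.1 - (i : Int) - 1) + 1 = nv2.1 := by ring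
      rw [harg]
      simp only [pvDropFirst_eq, pvDelPair, pvF]
  have hh := pvFoldHomMem pvF
      (fun t nv2 => pvInnerA xs kl ((xs.length : Nat) : Int) (i : Int) eol1 eno1 (nv2.1 - (i : Int) - 1) t)
      (fun (t : PvStB × (List (List String) × List (List String) × List (List Int) × List (List Int) × List (List String) × List (List String))) nv2 =>
        (pvInnerB (i : Int) eol1 eno1 nv2.1 t.1, t.2))
      L s1 hhom
  rw [← hh]
  have hsplit : pvF s1 = (PvStB.mk ((pvF s).1.no1 ++ [eno1]) (pvF s).1.no2 ((pvF s).1.ol1 ++ [eol1])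
      (pvF s).1.ol2 ((pvF s).1.rs1 ++ [[pvSym (2 * (i : Int)), pvSym (2 * (i : Int) + 1)]]) (pvF s).1.rs2,
      (pvF s).2) := rfl
  rw [hsplit, pvFoldPair (fun b (nv2 : Int × Int) => pvInnerB (i : Int) eol1 eno1 nv2.1 b) L]

lemma pvKey (xs : List Int) (NO : List String) (OL : List Int) (kl : Bool)
    (hcnt : kl = true → xs.countP (· == 1) ≤ 1) :
    pvF ((PySem.List.pyRange 0 (PySem.List.len xs) 1).foldl (fun s n =>
        if PySem.List.pyGetD xs n 0 == 1 then
          pvStepA xs NO OL kl (PySem.List.len xs) n s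
        else s) ⟨[], [], [], [], [], [], [], [], [], [], [], []⟩)
      = ((pvOcc xs).foldl (fun s a => pvStepB NO OL (pvOcc xs) a s) ⟨[], [], [], [], [], []⟩,
         ([], [], [], [], [], [])) := by
  rw [PySem.List.len_eq, pvOcc_eq]
  rw [pvGuardFold, List.foldl_map]
  have hh := pvFoldHomMem pvF
      (fun s (nv : Int × Int) => pvStepA xs NO OL kl ((xs.length : Nat) : Int) nv.1 s)
      (fun (t : PvStB × (List (List String) × List (List String) × List (List Int) × List (List Int) × List (List String) × List (List String))) (nv : Int × Int) =>
        (pvStepB NO OL ((pvBase xs).map Prod.fst) nv.1 t.1, t.2))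
      (pvBase xs) ⟨[], [], [], [], [], [], [], [], [], [], [], []⟩
      (fun nv hmem t => pvStepHom xs NO OL kl hcnt nv hmem t)
  rw [← hh]
  have hsplit : pvF (⟨[], [], [], [], [], [], [], [], [], [], [], []⟩ : PvStA)
      = ((⟨[], [], [], [], [], []⟩ : PvStB), (([], [], [], [], [], []) :
          List (List String) × List (List String) × List (List Int) × List (List Int) × List (List String) × List (List String))) := rfl
  rw [hsplit, pvFoldPair (fun b (nv : Int × Int) => pvStepB NO OL ((pvBase xs).map Prod.fst) nv.1 b) (pvBase xs)]

-- ===== VERDICT (by name: the statement is the Claim_ definition above) =====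
theorem MakeProjectorCases_spec : Claim_equal_MakeProjectorCases := by
  intro ijklBath NormalOrder OrbitalListNoT Containskl _ hpre
  obtain ⟨_, hcnt⟩ := hpre
  unfold Spec_MakeProjectorCases
  rw [pvAeq, pvBeq]
  have key := pvKey ijklBath NormalOrder OrbitalListNoT Containskl hcnt
  have hnum : PySem.Int.mod (ijklBath.foldl (fun acc x => acc + x) 0) 2
      = PySem.Int.mod ijklBath.sum 2 := by
    rw [PySem.List.foldl_add ijklBath (fun x => x) 0]
    simp
  dsimp only
  have h1 := congrArg (fun t => t.1.no1) key
  have h2 := congrArg (fun t => t.1.no2) key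
  have h3 := congrArg (fun t => t.1.ol1) key
  have h4 := congrArg (fun t => t.1.ol2) key
  have h5 := congrArg (fun t => t.1.rs1) key
  have h6 := congrArg (fun t => t.1.rs2) key
  have h7 := congrArg (fun t => t.2.1) key
  have h8 := congrArg (fun t => t.2.2.1) key
  have h9 := congrArg (fun t => t.2.2.2.1) key
  have h10 := congrArg (fun t => t.2.2.2.2.1) key
  have h11 := congrArg (fun t => t.2.2.2.2.2.1) key
  have h12 := congrArg (fun t => t.2.2.2.2.2.2) key
  simp only [pvF] at h1 h2 h3 h4 h5 h6 h7 h8 h9 h10 h11 h12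
  rw [h1, h2, h3, h4, h5, h6, h7, h8, h9, h10, h11, h12, hnum]
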